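-- pv_equiv track=rewrite | github.com/ShaunCleanCode/Algorithms | NEXON/three_problem3.py | countMeetings
-- ===== SOURCE A (Python) =====
-- def countMeetings(firstDay, lastDay):
--     # Pair each investor with their available days and sort by the last day available
--     investors = sorted(zip(firstDay, lastDay), key=lambda x: x[1])
--
--     # Keep track of scheduled meeting days to avoid double-booking
--     scheduled_days = set()
--     meetings_count = 0
--
--     for start, end in investors:
--         # Try to schedule a meeting within the investor's available range
--         for day in range(start, end + 1):
--             if day not in scheduled_days:
--                 scheduled_days.add(day)
--                 meetings_count += 1
--                 break
--
--     return meetings_count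
-- ===== SOURCE B (Python) =====
-- def countMeetings(firstDay, lastDay):
--     # Same greedy (earliest-deadline, earliest free day) but the linear scan over
--     # occupied days is replaced by union-find "next free day" pointers with path
--     # compression: an occupied stretch is skipped by pointer jumps instead of
--     # being re-scanned day by day.
--     investors = sorted(zip(firstDay, lastDay), key=lambda x: x[1])
--     nxt = {}  # occupied day -> a strictly later day; every day in between is occupied
--     count = 0
--     for start, end in investors:
--         day = start
--         path = []
--         while day in nxt:
--             path.append(day)
--             day = nxt[day]
--         if day <= end:
--             count += 1
--             nxt[day] = day + 1
--             for p in path:  # path compression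
--                 nxt[p] = day + 1
--     return count
-- ===== Notes on version B (the rewrite author's own statement) =====
-- stated objective: alternative
-- what changed: The inner day-by-day scan over the occupied range is replaced by union-find 'next free day' pointers with path compression, finding each investor's earliest free day by pointer jumps instead of testing every day from start (intended as faster on long occupied runs; measured ~1.28x on the random timing inputs, so not claimed as faster).
import Mathlib
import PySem

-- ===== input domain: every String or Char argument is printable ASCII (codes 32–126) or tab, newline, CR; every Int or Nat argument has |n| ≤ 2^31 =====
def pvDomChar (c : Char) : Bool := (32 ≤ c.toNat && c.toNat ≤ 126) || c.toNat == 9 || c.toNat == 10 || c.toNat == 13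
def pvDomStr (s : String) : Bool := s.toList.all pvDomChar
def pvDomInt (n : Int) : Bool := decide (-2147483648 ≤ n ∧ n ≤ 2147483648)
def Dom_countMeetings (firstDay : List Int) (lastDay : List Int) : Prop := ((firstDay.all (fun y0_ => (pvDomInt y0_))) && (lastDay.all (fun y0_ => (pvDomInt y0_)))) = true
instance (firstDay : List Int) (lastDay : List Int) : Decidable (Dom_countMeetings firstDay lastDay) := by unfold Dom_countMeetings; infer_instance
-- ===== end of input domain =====

-- B replaces A's day-by-day scan for the earliest free day with union-find
-- "next free day" pointers with path compression (objective: alternative).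

-- ===== PORT A =====
-- the inner 'for day in range(start, end+1): if day not in scheduled: add, count+=1, break'
-- (range(start, end+1) is iterated lazily, exactly as Python's range object is)
def pvInnerA (day e : Int) (s : PySem.Set Int) (c : Int) : PySem.Set Int × Int :=
  if h : day < e + 1 then
    if PySem.Set.contains s day then pvInnerA (day + 1) e s c
    else (PySem.Set.add s day, c + 1)
  else (s, c)
termination_by (e + 1 - day).toNat
decreasing_by omega

-- the body of A's 'for start, end in investors' loop
def pvStepA (acc : PySem.Set Int × Int) (p : Int × Int) : PySem.Set Int × Int :=
  pvInnerA p.1 p.2 acc.1 acc.2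

def countMeetings (firstDay : List Int) (lastDay : List Int) : Int :=
  let investors := PySem.List.sorted (List.zip firstDay lastDay) (fun x => x.2) false
  (investors.foldl pvStepA (PySem.Set.empty, 0)).2

-- ===== PORT B =====
-- the 'while day in nxt: path.append(day); day = nxt[day]' loop; fuel bounds the
-- number of iterations (≤ number of keys; proved sufficient in pvWalk_spec below)
def pvWalk : Nat → PySem.Dict Int Int → Int → List Int → (Int × List Int)
  | 0, _, d, path => (d, path)
  | fuel + 1, nxt, d, path =>
      match nxt.get? d with
      | none => (d, path)
      | some v => pvWalk fuel nxt v (path ++ [d])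

-- the body of B's 'for start, end in investors' loop (walk, then compress the path)
def pvStepB (acc : PySem.Dict Int Int × Int) (p : Int × Int) : PySem.Dict Int Int × Int :=
  let w := pvWalk (acc.1.size + 1) acc.1 p.1 []
  if w.1 ≤ p.2 then
    (w.2.foldl (fun m q => m.insert q (w.1 + 1)) (acc.1.insert w.1 (w.1 + 1)), acc.2 + 1)
  else acc

def countMeetings_alt (firstDay : List Int) (lastDay : List Int) : Int :=
  let investors := PySem.List.sorted (List.zip firstDay lastDay) (fun x => x.2) false
  (investors.foldl pvStepB (PySem.Dict.empty, 0)).2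

-- ===== PRECONDITION & SPEC =====
def Spec_countMeetings (firstDay : List Int) (lastDay : List Int) (out : Int) : Prop := out = countMeetings_alt firstDay lastDay
instance (firstDay : List Int) (lastDay : List Int) (out : Int) : Decidable (Spec_countMeetings firstDay lastDay out) := by unfold Spec_countMeetings; infer_instance

-- ===== CLAIM (what is proved, stated in full; the proofs are below) =====
def Claim_equal_countMeetings : Prop := ∀ (firstDay : List Int) (lastDay : List Int), Dom_countMeetings firstDay lastDay → Spec_countMeetings firstDay lastDay (countMeetings firstDay lastDay)

-- ===== LEMMAS AND PROOFS =====

-- the simulation invariant between A's scheduled-day set S and B's pointer dict: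
-- keys are exactly the scheduled days, and each pointer jumps over scheduled days only
def pvInv (S : PySem.Set Int) (nxt : PySem.Dict Int Int) : Prop :=
  nxt.keys.Nodup ∧
  (∀ d : Int, (nxt.get? d).isSome ↔ d ∈ S) ∧
  (∀ d v : Int, nxt.get? d = some v → d < v ∧ ∀ x : Int, d ≤ x → x < v → x ∈ S)

theorem pv_filter_lt {l : List (Int × Int)} {d v : Int} (hdv : d < v)
    (hmem : (d, v) ∈ l) :
    (l.filter (fun kv => decide (v ≤ kv.1))).length <
      (l.filter (fun kv => decide (d ≤ kv.1))).length := by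
  have hsub : List.Sublist (l.filter (fun kv => decide (v ≤ kv.1)))
      (l.filter (fun kv => decide (d ≤ kv.1))) := by
    apply List.monotone_filter_right
    intro a ha
    simp only [decide_eq_true_eq] at *
    omega
  have hle := hsub.length_le
  rcases lt_or_eq_of_le hle with h | h
  · exact h
  · exfalso
    have heq := hsub.eq_of_length h
    have hmem' : (d, v) ∈ l.filter (fun kv => decide (d ≤ kv.1)) := by
      simp [List.mem_filter, hmem]
    rw [← heq] at hmem'
    simp [List.mem_filter] at hmem'
    omega

theorem pvWalk_spec (S : PySem.Set Int) (nxt : PySem.Dict Int Int)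
    (hInv : pvInv S nxt) :
    ∀ (fuel : Nat) (d : Int) (path : List Int),
      (nxt.items.filter (fun kv => decide (d ≤ kv.1))).length < fuel →
      (pvWalk fuel nxt d path).1 ∉ S ∧
      d ≤ (pvWalk fuel nxt d path).1 ∧
      (∀ x : Int, d ≤ x → x < (pvWalk fuel nxt d path).1 → x ∈ S) ∧
      (∀ q ∈ (pvWalk fuel nxt d path).2,
        q ∈ path ∨ (d ≤ q ∧ q < (pvWalk fuel nxt d path).1)) := by
  obtain ⟨hnd, hiff, hran⟩ := hInv
  intro fuel
  induction fuel with
  | zero => intro d path h; omega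
  | succ n ih =>
    intro d path h
    cases hg : nxt.get? d with
    | none =>
      have hdS : d ∉ S := by
        intro hdS
        have := (hiff d).mpr hdS
        rw [hg] at this
        simp at this
      have heq : pvWalk (n + 1) nxt d path = (d, path) := by
        simp [pvWalk, hg]
      rw [heq]
      refine ⟨hdS, le_refl d, ?_, fun q hq => Or.inl hq⟩
      intro x h1 h2
      rw [show ((d, path).1 : Int) = d from rfl] at h2
      omega
    | some v =>
      obtain ⟨hdv, hcov⟩ := hran d v hg
      have hmem : (d, v) ∈ nxt.items := PySem.Dict.mem_items_of_get?_eq_some nxt hg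
      have hlt := pv_filter_lt hdv hmem
      have hfuel : (nxt.items.filter (fun kv => decide (v ≤ kv.1))).length < n := by omega
      obtain ⟨h1, h2, h3, h4⟩ := ih v (path ++ [d]) hfuel
      have heq : pvWalk (n + 1) nxt d path = pvWalk n nxt v (path ++ [d]) := by
        simp [pvWalk, hg]
      rw [heq]
      refine ⟨h1, by omega, ?_, ?_⟩
      · intro x hx1 hx2
        by_cases hxv : x < v
        · exact hcov x hx1 hxv
        · exact h3 x (by omega) hx2
      · intro q hq
        rcases h4 q hq with hcase | hcase
        · rcases List.mem_append.mp hcase with hc | hc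
          · exact Or.inl hc
          · simp only [List.mem_singleton] at hc
            subst hc
            exact Or.inr ⟨le_refl q, by omega⟩
        · exact Or.inr ⟨by omega, hcase.2⟩

-- A's inner loop resolved by the earliest free day f ≥ start
theorem pvInnerA_spec (S : PySem.Set Int) (f e : Int) (hf : f ∉ S) :
    ∀ (n : Nat) (start : Int) (c : Int), (e + 1 - start).toNat = n →
      start ≤ f → (∀ x : Int, start ≤ x → x < f → x ∈ S) →
      pvInnerA start e S c =
        if f ≤ e then (PySem.Set.add S f, c + 1) else (S, c) := by
  intro n
  induction n with
  | zero =>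
    intro start c hn hsf hcov
    have hse : ¬ start < e + 1 := by omega
    have hne : ¬ f ≤ e := by omega
    rw [pvInnerA, dif_neg hse, if_neg hne]
  | succ m ih =>
    intro start c hn hsf hcov
    have hse : start < e + 1 := by omega
    rw [pvInnerA, dif_pos hse]
    by_cases hstart : start = f
    · subst hstart
      have hc : PySem.Set.contains S start = false := by
        rw [← Bool.not_eq_true, PySem.Set.contains_iff]
        exact hf
      have hle : start ≤ e := by omega
      rw [hc, if_neg (by simp), if_pos hle]
    · have hsS : start ∈ S := hcov start (le_refl start) (by omega)
      have hcont : PySem.Set.contains S start = true :=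
        (PySem.Set.contains_iff S start).mpr hsS
      rw [hcont, if_pos rfl]
      exact ih (start + 1) c (by omega) (by omega) (fun x h1 h2 => hcov x (by omega) h2)

-- lookup after B's compression writes: every inserted value is the same
theorem pv_get?_foldl_insert_const (w : Int) :
    ∀ (l : List Int) (m : PySem.Dict Int Int) (k : Int),
      (l.foldl (fun m q => m.insert q w) m).get? k =
        if k ∈ l then some w else m.get? k := by
  intro l
  induction l with
  | nil => intro m k; simp
  | cons q t ih =>
    intro m k
    simp only [List.foldl_cons, ih, List.mem_cons]
    by_cases hkt : k ∈ t
    · simp [hkt]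
    · by_cases hkq : k = q
      · subst hkq
        simp [hkt, PySem.Dict.get?_insert_self]
      · simp [hkt, hkq, PySem.Dict.get?_insert_of_ne _ _ hkq]

-- the fold invariant: same count, related states
theorem pv_fold_eq :
    ∀ (l : List (Int × Int)) (S : PySem.Set Int) (nxt : PySem.Dict Int Int) (c : Int),
      S.Nodup → pvInv S nxt →
      (l.foldl pvStepA (S, c)).2 = (l.foldl pvStepB (nxt, c)).2 := by
  intro l
  induction l with
  | nil => intro S nxt c _ _; simp
  | cons p t ih =>
    intro S nxt c hnds hInv
    obtain ⟨hnd, hiff, hran⟩ := hInv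
    have hfuel : (nxt.items.filter (fun kv => decide (p.1 ≤ kv.1))).length < nxt.size + 1 := by
      have := List.length_filter_le (fun kv => decide (p.1 ≤ kv.1)) nxt.items
      simp only [PySem.Dict.size] at *
      omega
    obtain ⟨hfS, hsf, hcov, hpath⟩ :=
      pvWalk_spec S nxt ⟨hnd, hiff, hran⟩ (nxt.size + 1) p.1 [] hfuel
    set w := pvWalk (nxt.size + 1) nxt p.1 [] with hw
    have hinner := pvInnerA_spec S w.1 p.2 hfS (p.2 + 1 - p.1).toNat p.1 c rfl hsf hcov
    have hA : pvStepA (S, c) p = if w.1 ≤ p.2 then (PySem.Set.add S w.1, c + 1) else (S, c) := by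
      simp only [pvStepA]
      exact hinner
    set nxt' := w.2.foldl (fun m q => m.insert q (w.1 + 1)) (nxt.insert w.1 (w.1 + 1)) with hnxt'
    have hB : pvStepB (nxt, c) p = if w.1 ≤ p.2 then (nxt', c + 1) else (nxt, c) := by
      simp only [pvStepB, ← hw, ← hnxt']
    simp only [List.foldl_cons, hA, hB]
    by_cases hend : w.1 ≤ p.2
    · rw [if_pos hend, if_pos hend]
      have hget : ∀ k : Int, nxt'.get? k =
          if k ∈ w.2 then some (w.1 + 1)
          else if k = w.1 then some (w.1 + 1) else nxt.get? k := by
        intro k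
        rw [hnxt', pv_get?_foldl_insert_const]
        by_cases h1 : k ∈ w.2
        · rw [if_pos h1, if_pos h1]
        · rw [if_neg h1, if_neg h1]
          by_cases h2 : k = w.1
          · subst h2
            rw [if_pos rfl, PySem.Dict.get?_insert_self]
          · rw [if_neg h2, PySem.Dict.get?_insert_of_ne _ _ h2]
      have hpathS : ∀ q ∈ w.2, p.1 ≤ q ∧ q < w.1 := by
        intro q hq
        rcases hpath q hq with h | h
        · simp at h
        · exact h
      have hInv' : pvInv (PySem.Set.add S w.1) nxt' := by
        refine ⟨?_, ?_, ?_⟩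
        · rw [hnxt']
          exact PySem.Dict.nodup_keys_foldl_insert w.2 (fun _ _ => w.1 + 1) _
            (PySem.Dict.nodup_keys_insert _ _ _ hnd)
        · intro d
          rw [hget d]
          by_cases h1 : d ∈ w.2
          · have hd := hpathS d h1
            have hdS : d ∈ S := hcov d hd.1 hd.2
            simp [h1, PySem.Set.mem_add, hdS]
          · by_cases h2 : d = w.1
            · subst h2
              simp [h1, PySem.Set.mem_add]
            · simp [h1, h2, PySem.Set.mem_add, hiff d]
        · intro d v hdv
          rw [hget d] at hdv
          by_cases h1 : d ∈ w.2
          · rw [if_pos h1] at hdv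
            injection hdv with hv
            subst hv
            have hd := hpathS d h1
            refine ⟨by omega, ?_⟩
            intro x hx1 hx2
            rw [PySem.Set.mem_add]
            by_cases hxf : x = w.1
            · exact Or.inr hxf
            · exact Or.inl (hcov x (by omega) (by omega))
          · rw [if_neg h1] at hdv
            by_cases h2 : d = w.1
            · subst h2
              rw [if_pos rfl] at hdv
              injection hdv with hv
              subst hv
              refine ⟨by omega, ?_⟩
              intro x hx1 hx2
              rw [PySem.Set.mem_add]
              exact Or.inr (by omega)
            · rw [if_neg h2] at hdv
              obtain ⟨hlt, hc⟩ := hran d v hdv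
              exact ⟨hlt, fun x h1' h2' =>
                (PySem.Set.mem_add S w.1 x).mpr (Or.inl (hc x h1' h2'))⟩
      exact ih (PySem.Set.add S w.1) nxt' (c + 1) (PySem.Set.nodup_add S w.1 hnds) hInv'
    · rw [if_neg hend, if_neg hend]
      exact ih S nxt c hnds ⟨hnd, hiff, hran⟩

-- ===== VERDICT (by name: the statement is the Claim_ definition above) =====
theorem countMeetings_spec : Claim_equal_countMeetings := by
  intro firstDay lastDay _
  unfold Spec_countMeetings countMeetings countMeetings_alt
  exact pv_fold_eq (PySem.List.sorted (List.zip firstDay lastDay) (fun x => x.2) false)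
    PySem.Set.empty PySem.Dict.empty 0 List.nodup_nil
    ⟨by simp [PySem.Dict.keys_empty], fun d => by simp [PySem.Dict.get?_empty, PySem.Set.empty],
     fun d v h => by rw [PySem.Dict.get?_empty] at h; cases h⟩
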